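-- pv_equiv track=rewrite | github.com/MrSavageBanana/MyDotFiles | waybar/scripts/check-config-sync.py | format_tooltip
-- ===== SOURCE A (Python) =====
-- from collections import defaultdict
--
-- def simplify_path(path, all_paths):
--     """Find the shortest unique suffix for a given path"""
--     parts = path.split('/')
--
--     # Try each depth from shortest to longest
--     for depth in range(1, len(parts) + 1):
--         candidate = '/'.join(parts[-depth:])
--
--         # Check if this candidate matches any other path
--         matches = [p for p in all_paths if p.endswith(candidate) and p != path]
--
--         if not matches:
--             return candidate
--
--     # Fallback to full path
--     return path
--
-- def format_tooltip(mismatched_paths, all_paths):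
--     """Format tooltip with app grouping"""
--     # Simplify paths
--     simplified = []
--     for path in mismatched_paths:
--         simplified.append((path, simplify_path(path, all_paths)))
--
--     # Group by top-level folder (app)
--     grouped = defaultdict(list)
--     for full_path, simple_path in simplified:
--         app = full_path.split('/')[0].capitalize()
--         grouped[app].append(simple_path)
--
--     # Format output
--     lines = []
--     for app in sorted(grouped.keys()):
--         files = sorted(grouped[app])
--         # App name on its own line
--         lines.append(f"{app} -")
--         # All files below it
--         for file in files:
--             lines.append(file)
--
--     return '\n'.join(lines)
-- ===== SOURCE B (Python) =====
-- def format_tooltip(mismatched_paths, all_paths):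
--     """Format tooltip with app grouping (suffix-count index instead of rescanning)."""
--     # Count, for every path, each of its character suffixes once.
--     suffix_count = {}
--     for p in all_paths:
--         for i in range(len(p) + 1):
--             s = p[i:]
--             suffix_count[s] = suffix_count.get(s, 0) + 1
--     occurrences = {}
--     for p in all_paths:
--         occurrences[p] = occurrences.get(p, 0) + 1
--     # A component-suffix candidate of `path` is unique iff every path ending
--     # with it is an occurrence of `path` itself.
--     pairs = []
--     for path in mismatched_paths:
--         parts = path.split('/')
--         simple = path
--         for depth in range(1, len(parts) + 1):
--             candidate = '/'.join(parts[-depth:])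
--             if suffix_count.get(candidate, 0) == occurrences.get(path, 0):
--                 simple = candidate
--                 break
--         pairs.append((parts[0].capitalize(), simple))
--     lines = []
--     for app in sorted({a for a, _ in pairs}):
--         lines.append(f"{app} -")
--         lines.extend(sorted(s for a, s in pairs if a == app))
--     return '\n'.join(lines)
-- ===== Notes on version B (the rewrite author's own statement) =====
-- stated objective: faster
-- what changed: B builds a suffix-count dictionary over all_paths once and tests each candidate's uniqueness by comparing its suffix count with the path's own multiplicity, instead of rescanning all_paths for every candidate; grouping is done by a sorted pass over (app, simplified) pairs with filters instead of a defaultdict of lists.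
import Mathlib
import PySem

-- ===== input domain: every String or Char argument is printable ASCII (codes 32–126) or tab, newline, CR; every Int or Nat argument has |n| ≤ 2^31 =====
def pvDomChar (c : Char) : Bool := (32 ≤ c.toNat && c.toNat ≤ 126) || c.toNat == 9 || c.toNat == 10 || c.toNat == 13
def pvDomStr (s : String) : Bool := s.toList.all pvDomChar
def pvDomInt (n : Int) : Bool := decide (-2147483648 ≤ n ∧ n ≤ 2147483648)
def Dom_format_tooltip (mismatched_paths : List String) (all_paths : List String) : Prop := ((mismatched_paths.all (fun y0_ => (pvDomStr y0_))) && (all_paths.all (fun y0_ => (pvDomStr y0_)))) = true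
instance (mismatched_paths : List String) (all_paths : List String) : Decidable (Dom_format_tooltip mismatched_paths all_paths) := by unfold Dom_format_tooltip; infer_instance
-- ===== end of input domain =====

-- ===== PORT A =====
-- B replaces A's per-candidate rescan of all_paths by a suffix-count index and the
-- defaultdict grouping by filters over sorted (app, simplified) pairs; faster in a timing run.

-- str.capitalize(): first char upper-cased, rest lower-cased (exact on the ASCII Dom,
-- where Python's title-case of the first character coincides with upper-case).
def pyCapitalize (s : String) : String :=
  match s.toList with
  | [] => ""
  | c :: cs => String.ofList (PySem.Chars.upperChar c :: PySem.Chars.lower cs)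

-- path.split('/'): '/' is nonempty so split? is always `some`; the getD default is never used
def pySplitSlash (s : String) : List String := (PySem.Str.split? s "/").getD []

-- the 'for depth in range(1, len(parts)+1)' loop of simplify_path, with its early return
def simplify_path_go (path : String) (all_paths : List String) (parts : List String) :
    List Int → String
  | [] => path                -- loop exhausted: fallback to full path
  | depth :: rest =>
    let candidate := PySem.Str.join "/" (PySem.List.slice parts (some (-depth)) none)
    let matched := all_paths.filter (fun p => PySem.Str.endswith p candidate && !(p == path))
    if matched = [] then candidate else simplify_path_go path all_paths parts rest

def simplify_path (path : String) (all_paths : List String) : String :=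
  let parts := pySplitSlash path
  simplify_path_go path all_paths parts (PySem.List.pyRange 1 (PySem.List.len parts + 1) 1)

def format_tooltip (mismatched_paths : List String) (all_paths : List String) : String :=
  let simplified := mismatched_paths.foldl
    (fun acc path => acc ++ [(path, simplify_path path all_paths)]) []
  let grouped := simplified.foldl
    (fun d pr => d.modify (pyCapitalize (PySem.List.pyGetD (pySplitSlash pr.1) 0 "")) []
      (· ++ [pr.2])) PySem.Dict.empty
  let lines := (PySem.List.sorted grouped.keys (fun k => k) false).foldl
    (fun acc app =>
      (PySem.List.sorted (grouped.getD app []) (fun f => f) false).foldl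
        (fun a file => a ++ [file]) (acc ++ [app ++ " -"])) []
  PySem.Str.join "\n" lines

-- ===== PORT B =====
-- the 'for depth in ...: if suffix_count.get(...) == occurrences.get(...): ...; break' loop of B
def simplify_alt_go (path : String) (cnt occ : PySem.Dict String Int) (parts : List String) :
    List Int → String
  | [] => path                -- no break: simple stays the full path
  | depth :: rest =>
    let candidate := PySem.Str.join "/" (PySem.List.slice parts (some (-depth)) none)
    if cnt.getD candidate 0 == occ.getD path 0 then candidate
    else simplify_alt_go path cnt occ parts rest

def format_tooltip_alt (mismatched_paths : List String) (all_paths : List String) : String :=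
  let suffix_count := all_paths.foldl
    (fun d p => (PySem.List.pyRange 0 (PySem.Str.len p + 1) 1).foldl
      (fun d i =>
        let s := PySem.Str.slice p (some i) none
        d.insert s (d.getD s 0 + 1)) d) (PySem.Dict.empty : PySem.Dict String Int)
  let occurrences := all_paths.foldl (fun d p => d.insert p (d.getD p 0 + 1))
    (PySem.Dict.empty : PySem.Dict String Int)
  let pairs := mismatched_paths.foldl
    (fun acc path =>
      let parts := pySplitSlash path
      let simple := simplify_alt_go path suffix_count occurrences parts
        (PySem.List.pyRange 1 (PySem.List.len parts + 1) 1)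
      acc ++ [(pyCapitalize (PySem.List.pyGetD parts 0 ""), simple)]) []
  let lines := (PySem.List.sorted (PySem.Set.ofList (pairs.map (·.1))) (fun a => a) false).foldl
    (fun acc app =>
      acc ++ [app ++ " -"] ++
        PySem.List.sorted ((pairs.filter (fun pr => pr.1 == app)).map (·.2)) (fun f => f) false)
    []
  PySem.Str.join "\n" lines
-- ===== PRECONDITION & SPEC =====
def Spec_format_tooltip (mismatched_paths : List String) (all_paths : List String) (out : String) : Prop := out = format_tooltip_alt mismatched_paths all_paths
instance (mismatched_paths : List String) (all_paths : List String) (out : String) : Decidable (Spec_format_tooltip mismatched_paths all_paths out) := by unfold Spec_format_tooltip; infer_instance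

-- ===== CLAIM (what is proved, stated in full; the proofs are below) =====
def Claim_equal_format_tooltip : Prop := ∀ (mismatched_paths : List String) (all_paths : List String), Dom_format_tooltip mismatched_paths all_paths → Spec_format_tooltip mismatched_paths all_paths (format_tooltip mismatched_paths all_paths)

-- ===== LEMMAS AND PROOFS =====

theorem pv_join_cons (sep x : List Char) (l : List (List Char)) (hl : l ≠ []) :
    PySem.Chars.join sep (x :: l) = x ++ sep ++ PySem.Chars.join sep l := by
  cases l with
  | nil => exact absurd rfl hl
  | cons y ys => exact PySem.Chars.join_cons_cons sep x y ys

theorem pv_join_merge (sep : List Char) (xs : List (List Char)) (a b : List Char) :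
    PySem.Chars.join sep (xs ++ [a, b]) = PySem.Chars.join sep (xs ++ [a ++ sep ++ b]) := by
  induction xs with
  | nil =>
    simp only [List.nil_append]
    rw [PySem.Chars.join_cons_cons, PySem.Chars.join_singleton, PySem.Chars.join_singleton]
  | cons x xs ih =>
    rw [List.cons_append, List.cons_append,
      pv_join_cons sep x (xs ++ [a, b]) (by simp),
      pv_join_cons sep x (xs ++ [a ++ sep ++ b]) (by simp), ih]

theorem pv_join_go (sep : List Char) (fuel : Nat) (l cur : List Char) (acc : List (List Char))
    (hsep : sep ≠ []) (hfuel : l.length ≤ fuel) :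
    PySem.Chars.join sep (PySem.Chars.splitOn.go sep fuel l cur acc) =
      PySem.Chars.join sep (((cur.reverse ++ l) :: acc).reverse) := by
  induction fuel generalizing l cur acc with
  | zero =>
    cases List.length_eq_zero_iff.mp (Nat.le_zero.mp hfuel)
    rfl
  | succ fuel ih =>
    cases l with
    | nil => simp [PySem.Chars.splitOn.go]
    | cons c rest =>
      show PySem.Chars.join sep
          (if sep.isPrefixOf (c :: rest) = true then
            PySem.Chars.splitOn.go sep fuel (List.drop sep.length (c :: rest)) [] (cur.reverse :: acc)
          else PySem.Chars.splitOn.go sep fuel rest (c :: cur) acc) = _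
      by_cases hp : sep.isPrefixOf (c :: rest) = true
      · rw [if_pos hp]
        have hlen : (List.drop sep.length (c :: rest)).length ≤ fuel := by
          have := List.length_drop (l := c :: rest) (i := sep.length)
          have hs : 1 ≤ sep.length := by
            cases sep with | nil => exact absurd rfl hsep | cons _ _ => simp
          simp only [this]
          simp only [List.length_cons] at hfuel ⊢
          omega
        rw [ih _ _ _ hlen]
        have hsp : sep ++ List.drop sep.length (c :: rest) = c :: rest := by
          have h2 := List.prefix_iff_eq_append.mp (List.isPrefixOf_iff_prefix.mp hp)
          exact h2
        simp only [List.reverse_cons, List.nil_append, List.reverse_nil]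
        rw [List.append_assoc, show [cur.reverse] ++ [List.drop sep.length (c :: rest)]
              = [cur.reverse, List.drop sep.length (c :: rest)] from rfl]
        rw [pv_join_merge]
        rw [show cur.reverse ++ sep ++ List.drop sep.length (c :: rest)
              = cur.reverse ++ (c :: rest) by rw [List.append_assoc, hsp]]
      · rw [if_neg hp]
        have hlen : rest.length ≤ fuel := by simp only [List.length_cons] at hfuel; omega
        rw [ih _ _ _ hlen]
        simp

theorem pv_join_splitOn (l sep : List Char) (hsep : sep ≠ []) :
    PySem.Chars.join sep (PySem.Chars.splitOn l sep) = l := by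
  show PySem.Chars.join sep (PySem.Chars.splitOn.go sep (l.length + 1) l [] []) = l
  rw [pv_join_go sep (l.length + 1) l [] [] hsep (Nat.le_succ _)]
  simp [PySem.Chars.join_singleton]

theorem pv_join_drop_suffix (sep : List Char) (parts : List (List Char)) (k : Nat) :
    PySem.Chars.join sep (parts.drop k) <:+ PySem.Chars.join sep parts := by
  induction parts generalizing k with
  | nil => simp
  | cons p ps ih =>
    cases k with
    | zero => simp
    | succ k =>
      rw [List.drop_succ_cons]
      refine (ih k).trans ?_
      cases ps with
      | nil => simp [PySem.Chars.join_nil]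
      | cons q qs =>
        rw [PySem.Chars.join_cons_cons]
        exact List.suffix_append _ _

theorem pv_splitSlash_toList (path : String) :
    (pySplitSlash path).map String.toList = PySem.Chars.splitOn path.toList ['/'] := by
  simp [pySplitSlash, PySem.Str.split?, PySem.Chars.split?, List.map_map, Function.comp_def]

theorem pv_join_split_path (path : String) :
    (PySem.Str.join "/" (pySplitSlash path)).toList = path.toList := by
  rw [show (PySem.Str.join "/" (pySplitSlash path)).toList
        = PySem.Chars.join "/".toList ((pySplitSlash path).map String.toList) from
      PySem.Str.toList_join _ _]
  rw [pv_splitSlash_toList]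
  exact pv_join_splitOn _ _ (by simp)

theorem pv_candidate_suffix (path : String) (d : Int) (hd : 0 < d) :
    (PySem.Str.join "/" (PySem.List.slice (pySplitSlash path) (some (-d)) none)).toList <:+
      path.toList := by
  have hdn : d = ((d.toNat : Nat) : Int) := (Int.toNat_of_nonneg hd.le).symm
  rw [hdn, PySem.List.slice_from_neg_natCast _ _ (by omega)]
  rw [PySem.Str.toList_join, List.map_drop]
  rw [← pv_join_split_path path, PySem.Str.toList_join]
  exact pv_join_drop_suffix _ _ _


theorem pv_count_sfx (p c : String) :
    ((PySem.List.pyRange 0 (PySem.Str.len p + 1) 1).map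
        (fun i => PySem.Str.slice p (some i) none)).count c
      = if c.toList <:+ p.toList then 1 else 0 := by
  have hrange : PySem.List.pyRange 0 (PySem.Str.len p + 1) 1
      = (List.range (p.toList.length + 1)).map (fun k => ((k : Nat) : Int)) := by
    rw [PySem.List.pyRange_one]
    have : ((PySem.Str.len p + 1 - 0).toNat) = p.toList.length + 1 := by
      simp [PySem.Str.len]
    rw [this]
    simp
  have hslice : ∀ k : Nat, PySem.Str.slice p (some ((k : Nat) : Int)) none
      = String.ofList (p.toList.drop k) := by
    intro k
    rw [PySem.Str.slice]
    congr 1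
    rw [PySem.Chars.slice_eq_listSlice]
    exact PySem.List.slice_from_natCast _ _
  have : (PySem.List.pyRange 0 (PySem.Str.len p + 1) 1).map
      (fun i => PySem.Str.slice p (some i) none) = (List.range (p.toList.length + 1)).map
      (fun k => String.ofList (p.toList.drop k)) := by
    rw [hrange, List.map_map]
    simp [Function.comp_def, hslice]
  rw [this]
  by_cases h : c.toList <:+ p.toList
  · rw [if_pos h]
    apply List.count_eq_one_of_mem
    · apply List.Nodup.map_on _ List.nodup_range
      intro x hx y hy hxy
      have h2 : p.toList.drop x = p.toList.drop y := by
        have h3 := congrArg String.toList hxy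
        simpa using h3
      have hlx := congrArg List.length h2
      simp only [List.length_drop] at hlx
      simp only [List.mem_range] at hx hy
      omega
    · simp only [List.mem_map, List.mem_range]
      refine ⟨p.toList.length - c.toList.length, by omega, ?_⟩
      rw [← List.suffix_iff_eq_drop.mp h]
      apply String.toList_inj.mp
      simp
  · rw [if_neg h]
    rw [List.count_eq_zero]
    simp only [List.mem_map, List.mem_range]
    rintro ⟨k, -, hk⟩
    apply h
    have : c.toList = p.toList.drop k := by
      rw [← hk]; simp
    rw [this]
    exact List.drop_suffix _ _

-- B's suffix_count dict answers "how many paths end with c"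
theorem pv_cnt_aux (c : String) (ap : List String) : ∀ d : PySem.Dict String Int,
    (ap.foldl (fun d p => (PySem.List.pyRange 0 (PySem.Str.len p + 1) 1).foldl
        (fun d i => d.insert (PySem.Str.slice p (some i) none)
          ((d.getD (PySem.Str.slice p (some i) none) 0) + 1)) d) d).getD c 0
      = d.getD c 0 + (ap.countP (fun p => PySem.Str.endswith p c) : Int) := by
  induction ap with
  | nil => intro d; simp
  | cons p ap ih =>
    intro d
    rw [List.foldl_cons, ih]
    rw [show (PySem.List.pyRange 0 (PySem.Str.len p + 1) 1).foldl
        (fun d i => d.insert (PySem.Str.slice p (some i) none)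
          ((d.getD (PySem.Str.slice p (some i) none) 0) + 1)) d
        = ((PySem.List.pyRange 0 (PySem.Str.len p + 1) 1).map
            (fun i => PySem.Str.slice p (some i) none)).foldl
            (fun d s => d.insert s (d.getD s 0 + 1)) d by rw [List.foldl_map]]
    rw [PySem.Dict.getD_foldl_insert_add_one, pv_count_sfx]
    have hend : (PySem.Str.endswith p c = true) ↔ c.toList <:+ p.toList := by
      rw [PySem.Str.endswith_eq]; exact PySem.Chars.endswith_iff _ _
    rw [List.countP_cons]
    by_cases hsuf : c.toList <:+ p.toList
    · rw [if_pos hsuf, hend.mpr hsuf, if_pos rfl]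
      push_cast
      ring
    · have h1 : PySem.Str.endswith p c = false := by
        rw [Bool.eq_false_iff]
        intro hh
        exact hsuf (hend.mp hh)
      rw [if_neg hsuf, h1, if_neg Bool.false_ne_true]
      push_cast
      ring

theorem pv_occ_getD (ap : List String) (path : String) :
    (ap.foldl (fun d p => d.insert p (d.getD p 0 + 1))
        (PySem.Dict.empty : PySem.Dict String Int)).getD path 0 =
      (ap.count path : Int) := by
  rw [PySem.Dict.getD_foldl_insert_add_one, PySem.Dict.getD_empty]
  ring

-- counting split: matching paths = copies of path itself + strict matches (when path ends with c)
theorem pv_countP_split (ap : List String) (path c : String)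
    (hpc : PySem.Str.endswith path c = true) :
    ap.countP (fun p => PySem.Str.endswith p c) =
      ap.count path + ap.countP (fun p => PySem.Str.endswith p c && !(p == path)) := by
  induction ap with
  | nil => simp
  | cons a ap ih =>
    simp only [List.countP_cons, List.count_cons]
    rw [ih]
    by_cases ha : a = path
    · subst ha
      rw [hpc, beq_self_eq_true]
      simp only [Bool.not_true, Bool.and_false, if_true, Bool.false_eq_true, if_false]
      omega
    · have hne : (a == path) = false := by simp [ha]
      rw [hne]
      simp only [Bool.not_false, Bool.and_true]
      cases he : PySem.Str.endswith a c
      · simp only [Bool.false_eq_true, if_false]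
        omega
      · simp only [if_true, Bool.false_eq_true, if_false]
        omega

-- the uniqueness test of A and of B decide the same thing for a candidate that is a suffix of path
theorem pv_cond_iff (path c : String) (ap : List String) (hsuf : c.toList <:+ path.toList) :
    (ap.filter (fun p => PySem.Str.endswith p c && !(p == path)) = [])
      ↔ ((ap.foldl (fun d p => (PySem.List.pyRange 0 (PySem.Str.len p + 1) 1).foldl
          (fun d i => d.insert (PySem.Str.slice p (some i) none)
            ((d.getD (PySem.Str.slice p (some i) none) 0) + 1)) d)
          (PySem.Dict.empty : PySem.Dict String Int)).getD c 0
        == (ap.foldl (fun d p => d.insert p (d.getD p 0 + 1))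
          (PySem.Dict.empty : PySem.Dict String Int)).getD path 0)
          = true := by
  have hpc : PySem.Str.endswith path c = true := by
    rw [PySem.Str.endswith_eq]
    exact (PySem.Chars.endswith_iff _ _).mpr hsuf
  simp only [pv_cnt_aux c ap, pv_occ_getD, PySem.Dict.getD_empty, beq_iff_eq]
  rw [pv_countP_split ap path c hpc]
  constructor
  · intro h
    have : ap.countP (fun p => PySem.Str.endswith p c && !(p == path)) = 0 := by
      rw [List.countP_eq_zero]
      intro a ha
      simp only [List.filter_eq_nil_iff] at h
      exact h a ha
    rw [this]
    push_cast
    ring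
  · intro h
    have h0 : ap.countP (fun p => PySem.Str.endswith p c && !(p == path)) = 0 := by
      have := h
      push_cast at this
      omega
    rw [List.filter_eq_nil_iff]
    rw [List.countP_eq_zero] at h0
    exact h0

-- the two depth loops agree
theorem pv_go_eq (path : String) (ap : List String) (ds : List Int)
    (hds : ∀ d ∈ ds, 0 < d) :
    simplify_path_go path ap (pySplitSlash path) ds =
      simplify_alt_go path
        (ap.foldl (fun d p => (PySem.List.pyRange 0 (PySem.Str.len p + 1) 1).foldl
          (fun d i => d.insert (PySem.Str.slice p (some i) none)
            ((d.getD (PySem.Str.slice p (some i) none) 0) + 1)) d)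
          (PySem.Dict.empty : PySem.Dict String Int))
        (ap.foldl (fun d p => d.insert p (d.getD p 0 + 1))
          (PySem.Dict.empty : PySem.Dict String Int))
        (pySplitSlash path) ds := by
  induction ds with
  | nil => rfl
  | cons depth rest ih =>
    have hd : (0:Int) < depth := hds depth (List.mem_cons_self)
    have hrest : ∀ d ∈ rest, (0:Int) < d := fun d hdm => hds d (List.mem_cons_of_mem _ hdm)
    simp only [simplify_path_go, simplify_alt_go]
    rw [ih hrest]
    rw [if_congr (pv_cond_iff path _ ap (pv_candidate_suffix path depth hd)) rfl rfl]

-- ===== VERDICT (by name: the statement is the Claim_ definition above) =====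
theorem format_tooltip_spec : Claim_equal_format_tooltip := by
  intro mp ap _
  show format_tooltip mp ap = format_tooltip_alt mp ap
  unfold format_tooltip format_tooltip_alt
  dsimp only
  have hgo : ∀ path : String,
      simplify_alt_go path
        (ap.foldl (fun d p => (PySem.List.pyRange 0 (PySem.Str.len p + 1) 1).foldl
          (fun d i => d.insert (PySem.Str.slice p (some i) none)
            ((d.getD (PySem.Str.slice p (some i) none) 0) + 1)) d)
          (PySem.Dict.empty : PySem.Dict String Int))
        (ap.foldl (fun d p => d.insert p (d.getD p 0 + 1))
          (PySem.Dict.empty : PySem.Dict String Int))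
        (pySplitSlash path)
        (PySem.List.pyRange 1 (PySem.List.len (pySplitSlash path) + 1) 1)
      = simplify_path path ap := by
    intro path
    unfold simplify_path
    dsimp only
    refine (pv_go_eq path ap _ ?_).symm
    intro d hd
    have h1 := (PySem.List.mem_pyRange_one.mp hd).1
    omega
  simp only [PySem.List.foldl_append_singleton_eq_map, List.nil_append]
  simp only [hgo]
  rw [show (mp.map (fun path => (path, simplify_path path ap))).foldl
        (fun d pr => d.modify (pyCapitalize (PySem.List.pyGetD (pySplitSlash pr.1) 0 "")) []
          (· ++ [pr.2])) PySem.Dict.empty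
      = (mp.map (fun path =>
          (pyCapitalize (PySem.List.pyGetD (pySplitSlash path) 0 ""), simplify_path path ap))).foldl
          (fun d q => d.modify q.1 [] (· ++ [q.2])) PySem.Dict.empty by
    rw [List.foldl_map, List.foldl_map]]
  rw [PySem.Dict.keys_foldl_modify_key]
  rw [PySem.Dict.keys_empty, PySem.Set.update_nil_left]
  simp only [PySem.Dict.getD_foldl_modify_append, PySem.Dict.getD_empty, List.nil_append]
  simp only [List.map_id']
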